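-- pv_equiv track=rewrite | github.com/Twilight-Dream-Of-Magic/ePrint-IACR-PaperMyArchive | iwt_research/evidence/map_utils.py | peak_slice_multiplicity_point
-- ===== SOURCE A (Python) =====
-- from typing import Any, Dict, List
--
-- def peak_slice_multiplicity_point(observations_by_trace: List[List[int]]) -> Dict[str, Any]:
--     """
--     max_{t,y} m_t(y) with argmax (t,y). Report key: max_shadow_point.
--     """
--     if not observations_by_trace:
--         return {"max_multiplicity": 0, "time_index": None, "observation_value": None}
--     n = len(observations_by_trace)
--     T = len(observations_by_trace[0]) if n else 0
--     best_m = 0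
--     best_t = None
--     best_y = None
--     for t in range(T):
--         counts: Dict[int, int] = {}
--         for i in range(n):
--             y = int(observations_by_trace[i][t])
--             counts[y] = counts.get(y, 0) + 1
--         if not counts:
--             continue
--         y_star, m_star = max(counts.items(), key=lambda kv: kv[1])
--         if int(m_star) > best_m:
--             best_m = int(m_star)
--             best_t = int(t)
--             best_y = int(y_star)
--     return {"max_multiplicity": best_m, "time_index": best_t, "observation_value": best_y}
-- ===== SOURCE B (Python) =====
-- def peak_slice_multiplicity_point(observations_by_trace):
--     if not observations_by_trace:
--         return {"max_multiplicity": 0, "time_index": None, "observation_value": None}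
--     T = len(observations_by_trace[0])
--     # pass 1: one flat dict keyed by (t, y), counting every entry (column-major insertion order)
--     counts = {}
--     for t in range(T):
--         for row in observations_by_trace:
--             k = (t, int(row[t]))
--             counts[k] = counts.get(k, 0) + 1
--     # pass 2: argmax over the flat dict; strict '>' + insertion order pick earliest t, then
--     # the value whose first occurrence in that column is earliest
--     best_m, best_t, best_y = 0, None, None
--     for (t, y), m in counts.items():
--         if m > best_m:
--             best_m, best_t, best_y = m, t, y
--     return {"max_multiplicity": best_m, "time_index": best_t, "observation_value": best_y}
-- ===== Notes on version B (the rewrite author's own statement) =====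
-- stated objective: alternative
-- what changed: Replaces A's per-column counting-and-argmax (a fresh dict plus max(...) inside every column iteration) by two staged passes: one flat pass fills a single global dict keyed by (t, y) counting every entry, then a separate scan over that dict's items in insertion order keeps the best with strict '>', which reproduces A's earliest-t / first-inserted-value tie-breaking.
import Mathlib
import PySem

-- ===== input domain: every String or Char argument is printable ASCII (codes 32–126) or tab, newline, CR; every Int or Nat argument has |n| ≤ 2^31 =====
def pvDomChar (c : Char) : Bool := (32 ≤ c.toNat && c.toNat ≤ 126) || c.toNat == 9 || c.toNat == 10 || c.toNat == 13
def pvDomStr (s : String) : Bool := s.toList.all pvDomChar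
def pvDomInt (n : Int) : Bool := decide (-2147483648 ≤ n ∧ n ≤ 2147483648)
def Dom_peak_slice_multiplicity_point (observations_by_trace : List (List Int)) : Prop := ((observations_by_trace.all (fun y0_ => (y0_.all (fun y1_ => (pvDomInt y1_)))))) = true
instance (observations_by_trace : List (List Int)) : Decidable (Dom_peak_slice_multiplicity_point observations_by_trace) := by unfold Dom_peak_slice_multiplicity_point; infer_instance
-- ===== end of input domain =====

-- B replaces A's per-column dict + per-column max by two staged passes: one flat pass filling a
-- single global dict keyed by (t, y), then one scan of its items keeping the best with strict '>'
-- (alternative decomposition, same cost).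

-- ===== PORT A =====
def peak_slice_multiplicity_point (observations_by_trace : List (List Int)) : List (String × Option Int) :=
  if observations_by_trace = [] then
    [("max_multiplicity", some 0), ("time_index", none), ("observation_value", none)]
  else
    let n : Int := PySem.List.len observations_by_trace
    let T : Int := if n ≠ 0 then PySem.List.len (PySem.List.pyGetD observations_by_trace 0 []) else 0
    let best : Int × Option Int × Option Int :=
      (PySem.List.pyRange 0 T).foldl (fun b t =>
        let counts : PySem.Dict Int Int :=
          (PySem.List.pyRange 0 n).foldl (fun d i =>
            let y := PySem.List.pyGetD (PySem.List.pyGetD observations_by_trace i []) t 0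
            d.insert y (d.getD y 0 + 1)) PySem.Dict.empty
        if counts.items = [] then b
        else
          match PySem.List.max? counts.items (fun kv => kv.2) with
          | none => b   -- unreachable: counts is nonempty here (Python's max would raise on empty)
          | some (y_star, m_star) => if m_star > b.1 then (m_star, some t, some y_star) else b)
        (0, none, none)
    [("max_multiplicity", some best.1), ("time_index", best.2.1), ("observation_value", best.2.2)]

-- ===== PORT B =====
def peak_slice_multiplicity_point_alt (observations_by_trace : List (List Int)) : List (String × Option Int) :=
  if observations_by_trace = [] then
    [("max_multiplicity", some 0), ("time_index", none), ("observation_value", none)]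
  else
    let T : Int := PySem.List.len (PySem.List.pyGetD observations_by_trace 0 [])
    -- pass 1: one flat dict keyed by (t, y), counting every entry
    let counts : PySem.Dict (Int × Int) Int :=
      (PySem.List.pyRange 0 T).foldl (fun d t =>
        observations_by_trace.foldl (fun d row =>
          let k : Int × Int := (t, PySem.List.pyGetD row t 0)
          d.insert k (d.getD k 0 + 1)) d) PySem.Dict.empty
    -- pass 2: argmax over the flat dict's items in insertion order, strict '>'
    let best : Int × Option Int × Option Int :=
      counts.items.foldl (fun b km =>
        if km.2 > b.1 then (km.2, some km.1.1, some km.1.2) else b)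
        (0, none, none)
    [("max_multiplicity", some best.1), ("time_index", best.2.1), ("observation_value", best.2.2)]

-- ===== PRECONDITION & SPEC =====
-- Pre_ excludes exactly the inputs where A raises IndexError: a row shorter than row 0
-- (row[t] is read for every t < len(row 0)).  B raises there too.
def Pre_peak_slice_multiplicity_point (observations_by_trace : List (List Int)) : Prop :=
  ∀ row ∈ observations_by_trace, observations_by_trace.headI.length ≤ row.length
instance (observations_by_trace : List (List Int)) : Decidable (Pre_peak_slice_multiplicity_point observations_by_trace) := by unfold Pre_peak_slice_multiplicity_point; infer_instance

def pvWitness_peak_slice_multiplicity_point : List (List Int) := [[1, 2], [1, 3]]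

def Spec_peak_slice_multiplicity_point (observations_by_trace : List (List Int)) (out : List (String × Option Int)) : Prop := out = peak_slice_multiplicity_point_alt observations_by_trace
instance (observations_by_trace : List (List Int)) (out : List (String × Option Int)) : Decidable (Spec_peak_slice_multiplicity_point observations_by_trace out) := by unfold Spec_peak_slice_multiplicity_point; infer_instance

-- ===== CLAIM (what is proved, stated in full; the proofs are below) =====
def Claim_equal_peak_slice_multiplicity_point : Prop := ∀ (observations_by_trace : List (List Int)), Dom_peak_slice_multiplicity_point observations_by_trace → Pre_peak_slice_multiplicity_point observations_by_trace → Spec_peak_slice_multiplicity_point observations_by_trace (peak_slice_multiplicity_point observations_by_trace)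

-- ===== LEMMAS AND PROOFS =====

-- the column read at time t, and its per-column counter items tagged with t
def pvColumn (obs : List (List Int)) (t : Int) : List Int :=
  obs.map (fun row => PySem.List.pyGetD row t 0)

def pvTagged (obs : List (List Int)) (t : Int) : List ((Int × Int) × Int) :=
  (PySem.Dict.counter (pvColumn obs t)).items.map (fun p => ((t, p.1), p.2))

-- the state update of B's second pass
def pvScanStep (b : Int × Option Int × Option Int) (km : (Int × Int) × Int) :
    Int × Option Int × Option Int :=
  if km.2 > b.1 then (km.2, some km.1.1, some km.1.2) else b

-- the step of Python's max(..., key=...) fold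
def pvStep {α : Type} (f : α → Int) (acc : Option α) (x : α) : Option α :=
  match acc with
  | none => some x
  | some m => if f m < f x then some x else some m

theorem pv_max?_eq_foldl {α : Type} (l : List α) (f : α → Int) :
    PySem.List.max? l f = l.foldl (pvStep f) none := rfl

theorem pv_foldl_pvStep_some {α : Type} (f : α → Int) :
    ∀ (l : List α) (x : α),
      l.foldl (pvStep f) (some x)
      = some (match l.foldl (pvStep f) none with
              | none => x
              | some m => if f x < f m then m else x) := by
  intro l
  induction l with
  | nil => intro x; rfl
  | cons y l ih =>
    intro x
    have hstep : (y :: l).foldl (pvStep f) none = l.foldl (pvStep f) (some y) := rfl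
    by_cases hxy : f x < f y
    · simp only [List.foldl_cons, pvStep, if_pos hxy, ih y, hstep]
      cases hN : l.foldl (pvStep f) none with
      | none => simp [hxy]
      | some m =>
        by_cases hym : f y < f m
        · have hxm : f x < f m := by omega
          simp [hym, hxm]
        · simp [hym, hxy]
    · simp only [List.foldl_cons, pvStep, if_neg hxy, ih x, hstep, ih y]
      cases hN : l.foldl (pvStep f) none with
      | none => simp [hxy]
      | some m =>
        by_cases hym : f y < f m
        · simp [hym]
        · simp [hym, show ¬ f x < f m by omega, show ¬ f x < f y by omega]

theorem pv_max?_cons {α : Type} (f : α → Int) (x : α) (l : List α) :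
    PySem.List.max? (x :: l) f
    = some (match PySem.List.max? l f with
            | none => x
            | some m => if f x < f m then m else x) := by
  rw [pv_max?_eq_foldl, List.foldl_cons]
  show List.foldl (pvStep f) (some x) l = _
  rw [pv_foldl_pvStep_some, ← pv_max?_eq_foldl]

-- a strict-'>' best scan is decided by Python's max (first maximal element)
theorem pv_foldl_best {α : Type} (f : α → Int) (g : α → Int × Option Int × Option Int)
    (hg : ∀ x, (g x).1 = f x) :
    ∀ (l : List α) (b : Int × Option Int × Option Int),
      l.foldl (fun b x => if f x > b.1 then g x else b) b
      = match PySem.List.max? l f with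
        | none => b
        | some m => if f m > b.1 then g m else b := by
  intro l
  induction l with
  | nil => intro b; rfl
  | cons x l ih =>
    intro b
    rw [List.foldl_cons, ih, pv_max?_cons]
    cases hN : PySem.List.max? l f with
    | none => rfl
    | some m =>
      by_cases hxm : f x < f m
      · simp only [if_pos hxm]
        by_cases hxb : f x > b.1
        · rw [if_pos hxb, hg x, if_pos (by omega), if_pos (by omega)]
        · rw [if_neg hxb]
      · simp only [if_neg hxm]
        by_cases hxb : f x > b.1
        · rw [if_pos hxb, hg x, if_neg (by omega)]
        · rw [if_neg hxb, if_neg (show ¬ f m > b.1 by omega)]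

-- Python's max over a mapped list, seen through the map
theorem pv_max?_foldl_map {α β : Type} (key : β → Int) (g : α → β) :
    ∀ (l : List α) (a : Option α),
      List.foldl (pvStep key) (Option.map g a) (List.map g l)
      = Option.map g (List.foldl (pvStep (fun x => key (g x))) a l) := by
  intro l
  induction l with
  | nil => intro a; rfl
  | cons x t ih =>
    intro a
    cases a with
    | none => simpa [pvStep] using ih (some x)
    | some m =>
      by_cases h : key (g m) < key (g x)
      · simpa [pvStep, h] using ih (some x)
      · simpa [pvStep, h] using ih (some m)

theorem pv_max?_map {α β : Type} (l : List α) (g : α → β) (key : β → Int) :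
    PySem.List.max? (l.map g) key = (PySem.List.max? l (fun x => key (g x))).map g := by
  rw [pv_max?_eq_foldl, pv_max?_eq_foldl]
  simpa using pv_max?_foldl_map key g l none

-- lookup ignores a prefix of items none of whose keys match
theorem pv_get?_mk_append {ν : Type} (l1 l2 : List ((Int × Int) × ν)) (k : Int × Int)
    (h : ∀ p ∈ l1, (p.1 == k) = false) :
    (PySem.Dict.mk (l1 ++ l2)).get? k = (PySem.Dict.mk l2).get? k := by
  induction l1 with
  | nil => rfl
  | cons p t ih =>
    obtain ⟨a, b⟩ := p
    rw [List.cons_append, PySem.Dict.get?_mk_cons, if_neg]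
    · exact ih (fun q hq => h q (List.mem_cons_of_mem _ hq))
    · have := h (a, b) List.mem_cons_self
      simp at this ⊢
      exact this

-- insert lands entirely in the suffix when the prefix is key-fresh
theorem pv_insert_mk_append {ν : Type} (l1 : List ((Int × Int) × ν)) (c : PySem.Dict (Int × Int) ν)
    (k : Int × Int) (v : ν) (h : ∀ p ∈ l1, (p.1 == k) = false) :
    (PySem.Dict.mk (l1 ++ c.items)).insert k v = PySem.Dict.mk (l1 ++ (c.insert k v).items) := by
  apply PySem.Dict.ext
  have hc : (PySem.Dict.mk (l1 ++ c.items)).contains k = c.contains k := by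
    rw [PySem.Dict.contains_eq_isSome_get?, PySem.Dict.contains_eq_isSome_get?,
      pv_get?_mk_append l1 c.items k h]
  rw [PySem.Dict.items_insert, PySem.Dict.items_insert, hc]
  by_cases hck : c.contains k = true
  · rw [if_pos hck, if_pos hck]
    show (l1 ++ c.items).map _ = _
    rw [List.map_append]
    congr 1
    have hid : List.map (fun p => if (p.1 == k) = true then (k, v) else p) l1
        = List.map id l1 :=
      List.map_congr_left (fun p hp => by
        rw [if_neg (by rw [h p hp]; exact Bool.false_ne_true)]; rfl)
    rw [hid, List.map_id]
  · rw [if_neg hck, if_neg hck]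
    show (l1 ++ c.items) ++ [(k, v)] = _
    rw [List.append_assoc]

-- a counting fold whose keys are all fresh for the prefix acts on the suffix only
theorem pv_count_fold_fresh :
    ∀ (l : List (Int × Int)) (l1 : List ((Int × Int) × Int)) (c : PySem.Dict (Int × Int) Int),
      (∀ k ∈ l, ∀ p ∈ l1, (p.1 == k) = false) →
      l.foldl (fun d k => d.insert k (d.getD k 0 + 1)) (PySem.Dict.mk (l1 ++ c.items))
      = PySem.Dict.mk (l1 ++ (l.foldl (fun d k => d.insert k (d.getD k 0 + 1)) c).items) := by
  intro l
  induction l with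
  | nil => intro l1 c h; rfl
  | cons k t ih =>
    intro l1 c h
    have hk := fun p hp => h k List.mem_cons_self p hp
    have hgd : (PySem.Dict.mk (l1 ++ c.items)).getD k 0 = c.getD k 0 := by
      rw [PySem.Dict.getD_eq_get?_getD, PySem.Dict.getD_eq_get?_getD,
        pv_get?_mk_append l1 c.items k hk]
    rw [List.foldl_cons, List.foldl_cons, hgd, pv_insert_mk_append l1 c k _ hk]
    exact ih l1 _ (fun k' hk' p hp => h k' (List.mem_cons_of_mem _ hk') p hp)

-- the inner (per-column) loop of B appends that column's tagged counter to the dict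
theorem pv_inner (obs : List (List Int)) (t : Int) (d : PySem.Dict (Int × Int) Int)
    (h : ∀ p ∈ d.items, p.1.1 ≠ t) :
    obs.foldl (fun d row =>
        let k : Int × Int := (t, PySem.List.pyGetD row t 0)
        d.insert k (d.getD k 0 + 1)) d
    = PySem.Dict.mk (d.items ++
        (PySem.Dict.counter ((pvColumn obs t).map (fun y => (t, y)))).items) := by
  have h1 : obs.foldl (fun d row =>
        let k : Int × Int := (t, PySem.List.pyGetD row t 0)
        d.insert k (d.getD k 0 + 1)) d
      = ((pvColumn obs t).map (fun y => (t, y))).foldl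
          (fun d k => d.insert k (d.getD k 0 + 1)) d := by
    rw [List.foldl_map, pvColumn, List.foldl_map]
  have hfresh : ∀ k ∈ (pvColumn obs t).map (fun y => (t, y)), ∀ p ∈ d.items, (p.1 == k) = false := by
    intro k hkmem p hp
    obtain ⟨y, _, rfl⟩ := List.mem_map.mp hkmem
    exact beq_eq_false_iff_ne.mpr (fun he => h p hp (by rw [he]))
  have h2 := pv_count_fold_fresh ((pvColumn obs t).map (fun y => (t, y))) d.items
    PySem.Dict.empty hfresh
  have hd : PySem.Dict.mk (d.items ++ (PySem.Dict.empty : PySem.Dict (Int × Int) Int).items) = d := by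
    show PySem.Dict.mk (d.items ++ []) = d
    rw [List.append_nil]
  rw [hd] at h2
  rw [h1, h2, PySem.Dict.foldl_insert_getD_add_one_eq_counter]

-- ordered-dedup commutes with tagging (an injective map)
theorem pv_contains_map_tag (t : Int) :
    ∀ (s : List Int) (y : Int),
      PySem.Set.contains (s.map (fun y => ((t, y) : Int × Int))) (t, y) = PySem.Set.contains s y := by
  intro s y
  induction s with
  | nil => rfl
  | cons a s ih =>
    simp only [List.map_cons, PySem.Set.contains] at ih ⊢
    simp only [List.contains_cons, ih]
    have : (((t, y) : Int × Int) == (t, a)) = (y == a) := by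
      simp [Prod.ext_iff]
    rw [this]

theorem pv_ofList_foldl_map_tag (t : Int) :
    ∀ (l : List Int) (s : List Int),
      (l.map (fun y => ((t, y) : Int × Int))).foldl PySem.Set.add
          (s.map (fun y => ((t, y) : Int × Int)))
      = (l.foldl PySem.Set.add s).map (fun y => ((t, y) : Int × Int)) := by
  intro l
  induction l with
  | nil => intro s; rfl
  | cons a l ih =>
    intro s
    rw [List.map_cons, List.foldl_cons, List.foldl_cons]
    have hadd : PySem.Set.add (s.map (fun y => ((t, y) : Int × Int))) (t, a)
        = (PySem.Set.add s a).map (fun y => ((t, y) : Int × Int)) := by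
      simp only [PySem.Set.add, pv_contains_map_tag t s a]
      by_cases hc : PySem.Set.contains s a = true
      · rw [if_pos hc, if_pos hc]
      · rw [if_neg hc, if_neg hc, List.map_append]
        rfl
    rw [hadd, ih]

theorem pv_ofList_map_tag (t : Int) (l : List Int) :
    PySem.Set.ofList (l.map (fun y => ((t, y) : Int × Int)))
    = (PySem.Set.ofList l).map (fun y => ((t, y) : Int × Int)) := by
  have := pv_ofList_foldl_map_tag t l []
  simpa [PySem.Set.ofList, PySem.Set.empty] using this

-- the tagged column's counter lists exactly the tagged items of the column's counter
theorem pv_counter_tagged (obs : List (List Int)) (t : Int) :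
    (PySem.Dict.counter ((pvColumn obs t).map (fun y => (t, y)))).items = pvTagged obs t := by
  rw [PySem.Dict.items_counter, pvTagged, PySem.Dict.items_counter, pv_ofList_map_tag,
    List.map_map, List.map_map]
  apply List.map_congr_left
  intro y _
  simp only [Function.comp_apply]
  rw [List.count_map_of_injective _ _ (fun a b h => by simpa [Prod.ext_iff] using h) y]

-- pass 1 of B: the global dict is the concatenation of the tagged per-column counters
theorem pv_build (obs : List (List Int)) :
    ∀ (ts : List Int) (d : PySem.Dict (Int × Int) Int),
      ts.Nodup → (∀ p ∈ d.items, p.1.1 ∉ ts) →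
      (ts.foldl (fun d t =>
          obs.foldl (fun d row =>
            let k : Int × Int := (t, PySem.List.pyGetD row t 0)
            d.insert k (d.getD k 0 + 1)) d) d).items
      = d.items ++ ts.flatMap (pvTagged obs) := by
  intro ts
  induction ts with
  | nil => intro d _ _; simp
  | cons t rest ih =>
    intro d hnd hfresh
    rw [List.foldl_cons]
    have hstep := pv_inner obs t d
      (fun p hp => fun he => hfresh p hp (he ▸ List.mem_cons_self))
    rw [hstep, pv_counter_tagged]
    have hrest : ∀ p ∈ (PySem.Dict.mk (d.items ++ pvTagged obs t)).items, p.1.1 ∉ rest := by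
      intro p hp
      have hp' : p ∈ d.items ++ pvTagged obs t := hp
      rcases List.mem_append.mp hp' with h1 | h2
      · exact fun hin => hfresh p h1 (List.mem_cons_of_mem _ hin)
      · obtain ⟨q, _, rfl⟩ := List.mem_map.mp h2
        exact fun hin => (List.nodup_cons.mp hnd).1 hin
    rw [ih _ (List.nodup_cons.mp hnd).2 hrest]
    show d.items ++ pvTagged obs t ++ _ = _
    rw [List.flatMap_cons, List.append_assoc]

-- pass 2 of B over the concatenation = A's per-column argmax fold
theorem pv_scan_flat (obs : List (List Int)) :
    ∀ (ts : List Int) (b : Int × Option Int × Option Int),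
      (ts.flatMap (pvTagged obs)).foldl pvScanStep b
      = ts.foldl (fun b t =>
          match PySem.List.max? (PySem.Dict.counter (pvColumn obs t)).items (fun kv => kv.2) with
          | none => b
          | some ym => if ym.2 > b.1 then (ym.2, some t, some ym.1) else b) b := by
  intro ts
  induction ts with
  | nil => intro b; rfl
  | cons t rest ih =>
    intro b
    rw [List.flatMap_cons, List.foldl_append, List.foldl_cons, ← ih]
    congr 1
    show (pvTagged obs t).foldl
        (fun (b : Int × Option Int × Option Int) (km : (Int × Int) × Int) =>
          if km.2 > b.1 then (km.2, some km.1.1, some km.1.2) else b) b = _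
    rw [pv_foldl_best (fun (km : (Int × Int) × Int) => km.2)
      (fun km => (km.2, some km.1.1, some km.1.2)) (fun _ => rfl)]
    rw [pvTagged, pv_max?_map (PySem.Dict.counter (pvColumn obs t)).items
      (fun p => (((t, p.1), p.2) : (Int × Int) × Int)) (fun kv => kv.2)]
    cases hM : PySem.List.max? (PySem.Dict.counter (pvColumn obs t)).items (fun kv => kv.2) with
    | none => rfl
    | some ym => rfl

theorem pv_pyRange_nodup (n : Nat) : (PySem.List.pyRange 0 (n : Int)).Nodup := by
  rw [PySem.List.pyRange_zero_natCast]
  exact (List.nodup_range).map (fun a b h => by exact_mod_cast h)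

-- A's per-column body, rewritten through the column's counter
theorem pv_a_step (obs : List (List Int)) (t : Int) (b : Int × Option Int × Option Int) :
    (let counts : PySem.Dict Int Int :=
        (PySem.List.pyRange 0 (PySem.List.len obs)).foldl (fun d i =>
          let y := PySem.List.pyGetD (PySem.List.pyGetD obs i []) t 0
          d.insert y (d.getD y 0 + 1)) PySem.Dict.empty
      if counts.items = [] then b
      else
        match PySem.List.max? counts.items (fun kv => kv.2) with
        | none => b
        | some (y_star, m_star) => if m_star > b.1 then (m_star, some t, some y_star) else b)
    = match PySem.List.max? (PySem.Dict.counter (pvColumn obs t)).items (fun kv => kv.2) with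
      | none => b
      | some ym => if ym.2 > b.1 then (ym.2, some t, some ym.1) else b := by
  dsimp only
  have hrange := PySem.List.foldl_pyRange_pyGetD obs []
    (fun (d : PySem.Dict Int Int) row =>
      d.insert (PySem.List.pyGetD row t 0) (d.getD (PySem.List.pyGetD row t 0) 0 + 1))
    PySem.Dict.empty (le_refl 0)
  rw [hrange, show (Int.toNat 0) = 0 from rfl, List.drop_zero,
    ← List.foldl_map (f := fun row => PySem.List.pyGetD row t 0)
      (g := fun (d : PySem.Dict Int Int) y => d.insert y (d.getD y 0 + 1)),
    PySem.Dict.foldl_insert_getD_add_one_eq_counter,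
    show obs.map (fun row => PySem.List.pyGetD row t 0) = pvColumn obs t from rfl]
  cases hI : (PySem.Dict.counter (pvColumn obs t)).items with
  | nil => rw [if_pos rfl]; rfl
  | cons p rest =>
    rw [if_neg (by exact List.cons_ne_nil p rest)]
    rcases hM : PySem.List.max? (p :: rest) (fun kv : Int × Int => kv.2) with _ | ⟨y, m⟩
    · simp [pv_max?_cons] at hM
    · rfl

-- the two ports agree on every input
theorem pv_ports_eq (obs : List (List Int)) :
    peak_slice_multiplicity_point obs = peak_slice_multiplicity_point_alt obs := by
  by_cases hobs : obs = []
  · subst hobs; rfl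
  · unfold peak_slice_multiplicity_point peak_slice_multiplicity_point_alt
    rw [if_neg hobs, if_neg hobs]
    have hn : PySem.List.len obs ≠ 0 := by
      simp [PySem.List.len_eq, List.length_eq_zero_iff, hobs]
    simp only [if_pos hn]
    obtain ⟨L, hL⟩ : ∃ (L : Nat), PySem.List.len (PySem.List.pyGetD obs 0 []) = (L : Int) :=
      ⟨(PySem.List.pyGetD obs 0 []).length, by rw [PySem.List.len_eq]⟩
    rw [hL]
    have hbuild := pv_build obs (PySem.List.pyRange 0 (L : Int)) PySem.Dict.empty
      (pv_pyRange_nodup L) (fun p hp => absurd hp (List.not_mem_nil))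
    have hbest :
        (PySem.List.pyRange 0 (L : Int)).foldl (fun (b : Int × Option Int × Option Int) t =>
          let counts : PySem.Dict Int Int :=
            (PySem.List.pyRange 0 (PySem.List.len obs)).foldl (fun d i =>
              let y := PySem.List.pyGetD (PySem.List.pyGetD obs i []) t 0
              d.insert y (d.getD y 0 + 1)) PySem.Dict.empty
          if counts.items = [] then b
          else
            match PySem.List.max? counts.items (fun kv => kv.2) with
            | none => b
            | some (y_star, m_star) => if m_star > b.1 then (m_star, some t, some y_star) else b)
          (0, none, none)
        = ((PySem.List.pyRange 0 (L : Int)).foldl (fun d t =>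
            obs.foldl (fun d row =>
              let k : Int × Int := (t, PySem.List.pyGetD row t 0)
              d.insert k (d.getD k 0 + 1)) d) PySem.Dict.empty).items.foldl
            (fun (b : Int × Option Int × Option Int) km =>
              if km.2 > b.1 then (km.2, some km.1.1, some km.1.2) else b)
            (0, none, none) := by
      rw [hbuild,
        show (PySem.Dict.empty : PySem.Dict (Int × Int) Int).items = [] from rfl,
        List.nil_append]
      rw [show (fun (b : Int × Option Int × Option Int) (km : (Int × Int) × Int) =>
            if km.2 > b.1 then (km.2, some km.1.1, some km.1.2) else b) = pvScanStep from rfl]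
      rw [pv_scan_flat]
      exact PySem.List.foldl_congr_mem _ _ _ _ (fun b t _ => pv_a_step obs t b)
    exact congrArg (fun best : Int × Option Int × Option Int =>
      [("max_multiplicity", some best.1), ("time_index", best.2.1),
       ("observation_value", best.2.2)]) hbest

-- ===== VERDICT (by name: the statement is the Claim_ definition above) =====
theorem peak_slice_multiplicity_point_spec : Claim_equal_peak_slice_multiplicity_point := by
  intro obs _ _
  unfold Spec_peak_slice_multiplicity_point
  exact pv_ports_eq obs
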